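-- pv_equiv track=rewrite | github.com/maticstric/ecs235b-linear-cryptanalysis | spn.py | sort_linear_approximation_table
-- ===== SOURCE A (Python) =====
-- def sort_linear_approximation_table(linear_approximation_table):
--     table_copy = [r[:] for r in linear_approximation_table]
--     sorted_linear_approximations = []
--
--     max = 0
--     max_row = None
--     max_col = None
--
--     while True: # We'll return once max < 4
--         for row in range(len(table_copy)):
--             for col in range(len(table_copy[row])):
--                 if row == 0 and col == 0: continue
--
--                 if abs(table_copy[row][col]) > max:
--                     max = abs(table_copy[row][col])
--                     max_row = row
--                     max_col = col
--
--
--         if max < 4: # Ignore anything less than 4. It's probably not biased enough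
--             return sorted_linear_approximations
--         else:
--             sorted_linear_approximations.append((max_row, max_col, linear_approximation_table[max_row][max_col]))
--             table_copy[max_row][max_col] = 0
--             max = 0
-- ===== SOURCE B (Python) =====
-- def sort_linear_approximation_table(linear_approximation_table):
--     # One pass over the table collecting the biased cells, then a single stable
--     # sort by descending |value| (stability keeps ties in row-major order).
--     candidates = []
--     for row, r in enumerate(linear_approximation_table):
--         for col, value in enumerate(r):
--             if (row, col) != (0, 0) and abs(value) >= 4:
--                 candidates.append((row, col, value))
--     candidates.sort(key=lambda t: -abs(t[2]))
--     return candidates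
-- ===== Notes on version B (the rewrite author's own statement) =====
-- stated objective: faster
-- what changed: A repeatedly rescans the whole table for the current maximum |value| and zeroes it out; B collects all qualifying cells (|value| >= 4, excluding (0,0)) in one row-major pass and does a single stable sort by descending |value|, whose stability reproduces A's row-major tie-break.
import Mathlib
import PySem

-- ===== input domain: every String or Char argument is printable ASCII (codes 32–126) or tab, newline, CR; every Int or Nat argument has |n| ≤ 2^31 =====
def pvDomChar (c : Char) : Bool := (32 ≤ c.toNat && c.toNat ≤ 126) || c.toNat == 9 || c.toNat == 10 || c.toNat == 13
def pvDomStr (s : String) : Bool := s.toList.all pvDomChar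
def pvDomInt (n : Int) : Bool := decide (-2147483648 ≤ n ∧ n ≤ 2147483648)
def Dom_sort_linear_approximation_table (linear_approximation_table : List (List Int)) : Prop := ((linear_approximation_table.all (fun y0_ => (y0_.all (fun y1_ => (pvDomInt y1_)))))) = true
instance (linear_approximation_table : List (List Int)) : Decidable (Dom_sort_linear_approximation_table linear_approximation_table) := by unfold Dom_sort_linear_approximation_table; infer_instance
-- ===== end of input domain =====

-- B replaces A's repeated full-table max-rescans with one collection pass plus a single
-- stable sort by descending |value| (objective: faster — a better algorithm).

-- ===== PORT A =====
-- Python's abs on int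
def pvAbs (x : Int) : Int := if x < 0 then -x else x

-- the inner 'for col in range(len(table_copy[row]))' of A's scan
def pvScanRow (row : Int) (r : List Int) (s : Int × Option Int × Option Int) :
    Int × Option Int × Option Int :=
  (PySem.List.pyRange 0 r.length 1).foldl (fun s col =>
    if row = 0 ∧ col = 0 then s
    else if pvAbs (PySem.List.pyGetD r col 0) > s.1 then
      (pvAbs (PySem.List.pyGetD r col 0), some row, some col)
    else s) s

-- the outer 'for row in range(len(table_copy))' of A's scan (indices stay in range, so pyGetD is exact)
def pvScan (tc : List (List Int)) (s : Int × Option Int × Option Int) :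
    Int × Option Int × Option Int :=
  (PySem.List.pyRange 0 tc.length 1).foldl (fun s row =>
    pvScanRow row (PySem.List.pyGetD tc row []) s) s

-- A's 'while True' loop; state = (table_copy, carried (max_row, max_col), accumulator); 'max' is
-- reset to 0 before each scan exactly as in A.  The fuel only makes the recursion structural: it
-- strictly exceeds the number of cells with |v| ≥ 4, one of which is zeroed per iteration, so the
-- fuel-exhausted branch is unreachable (proved below).
def pvLoop (t : List (List Int)) : Nat → List (List Int) → Option Int × Option Int →
    List (Int × Int × Int) → List (Int × Int × Int)
  | 0, _, _, acc => acc
  | fuel+1, tc, rc, acc =>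
    let s := pvScan tc (0, rc.1, rc.2)
    if s.1 < 4 then acc
    else
      match s.2.1, s.2.2 with
      | some mr, some mc =>
        pvLoop t fuel
          (PySem.List.pySetD tc mr (PySem.List.pySetD (PySem.List.pyGetD tc mr []) mc 0))
          (some mr, some mc)
          (acc ++ [(mr, mc, PySem.List.pyGetD (PySem.List.pyGetD t mr []) mc 0)])
      | _, _ => acc  -- unreachable: s.1 ≥ 4 means the scan assigned both indices

def sort_linear_approximation_table (linear_approximation_table : List (List Int)) :
    List (Int × Int × Int) :=
  -- table_copy = [r[:] for r in linear_approximation_table]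
  let tc := linear_approximation_table.map (fun r => PySem.List.slice r none none)
  pvLoop linear_approximation_table ((linear_approximation_table.map List.length).sum + 1)
    tc (none, none) []

-- ===== PORT B =====
-- key=lambda t: -abs(t[2])
def pvKey (e : Int × Int × Int) : Int := -(pvAbs e.2.2)

def sort_linear_approximation_table_alt (linear_approximation_table : List (List Int)) :
    List (Int × Int × Int) :=
  let candidates :=
    (PySem.List.enumerate linear_approximation_table 0).foldl (fun acc p =>
      (PySem.List.enumerate p.2 0).foldl (fun acc2 q =>
        if (¬(p.1 = 0 ∧ q.1 = 0)) ∧ 4 ≤ pvAbs q.2 then acc2 ++ [(p.1, q.1, q.2)] else acc2)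
        acc) []
  PySem.List.sorted candidates pvKey false   -- candidates.sort(key=lambda t: -abs(t[2])), stable

-- ===== PRECONDITION & SPEC =====
def Spec_sort_linear_approximation_table (linear_approximation_table : List (List Int)) (out : List (Int × Int × Int)) : Prop := out = sort_linear_approximation_table_alt linear_approximation_table
instance (linear_approximation_table : List (List Int)) (out : List (Int × Int × Int)) : Decidable (Spec_sort_linear_approximation_table linear_approximation_table out) := by unfold Spec_sort_linear_approximation_table; infer_instance

-- ===== CLAIM (what is proved, stated in full; the proofs are below) =====
def Claim_equal_sort_linear_approximation_table : Prop := ∀ (linear_approximation_table : List (List Int)), Dom_sort_linear_approximation_table linear_approximation_table → Spec_sort_linear_approximation_table linear_approximation_table (sort_linear_approximation_table linear_approximation_table)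

-- ===== LEMMAS AND PROOFS =====

theorem pvAbs_nonneg (x : Int) : 0 ≤ pvAbs x := by unfold pvAbs; split_ifs <;> omega

-- first element with minimal key (ties: earliest)
def pvFmin {α : Type} (K : α → Int) : List α → Option α
  | [] => none
  | x :: xs =>
    match pvFmin K xs with
    | none => some x
    | some m => if K m < K x then some m else some x

-- erase the first element whose key is k
def pvEraseKey {α : Type} (K : α → Int) (k : Int) : List α → List α
  | [] => []
  | x :: xs => if K x = k then xs else x :: pvEraseKey K k xs

theorem pvFmin_eq_none_iff {α : Type} (K : α → Int) (xs : List α) :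
    pvFmin K xs = none ↔ xs = [] := by
  cases xs with
  | nil => simp [pvFmin]
  | cons x xs =>
    simp only [pvFmin]
    cases pvFmin K xs with
    | none => simp
    | some m => simp only []; split_ifs <;> simp

theorem pvFmin_mem {α : Type} (K : α → Int) (xs : List α) (m : α)
    (h : pvFmin K xs = some m) : m ∈ xs := by
  induction xs generalizing m with
  | nil => simp [pvFmin] at h
  | cons x xs ih =>
    simp only [pvFmin] at h
    cases hx : pvFmin K xs with
    | none => rw [hx] at h; simp at h; simp [h]
    | some m0 =>
      rw [hx] at h
      by_cases hlt : K m0 < K x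
      · simp [hlt] at h; subst h; exact List.mem_cons_of_mem _ (ih _ hx)
      · simp [hlt] at h; simp [h]

theorem pvFmin_le {α : Type} (K : α → Int) (xs : List α) (m : α)
    (h : pvFmin K xs = some m) : ∀ y ∈ xs, K m ≤ K y := by
  induction xs generalizing m with
  | nil => simp [pvFmin] at h
  | cons x xs ih =>
    intro y hy
    simp only [pvFmin] at h
    cases hx : pvFmin K xs with
    | none =>
      rw [hx] at h; simp at h; subst h
      rcases List.mem_cons.1 hy with rfl | hy'
      · exact le_refl _
      · rw [pvFmin_eq_none_iff] at hx; subst hx; simp at hy'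
    | some m0 =>
      rw [hx] at h
      by_cases hlt : K m0 < K x
      · simp [hlt] at h; subst h
        rcases List.mem_cons.1 hy with rfl | hy'
        · exact le_of_lt hlt
        · exact ih _ hx _ hy'
      · simp [hlt] at h; subst h
        rcases List.mem_cons.1 hy with rfl | hy'
        · exact le_refl _
        · exact le_trans (by omega) (ih _ hx _ hy')

theorem pvFmin_snoc {α : Type} (K : α → Int) (xs : List α) (y : α) :
    pvFmin K (xs ++ [y]) =
      some (match pvFmin K xs with
            | none => y
            | some m => if K y < K m then y else m) := by
  induction xs with
  | nil => simp [pvFmin]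
  | cons x xs ih =>
    simp only [List.cons_append, pvFmin, ih]
    cases hx : pvFmin K xs with
    | none => simp only []; split_ifs <;> simp_all
    | some m0 => simp only []; split_ifs <;> simp_all <;> omega

theorem pvFmin_spec {α : Type} (K : α → Int) (xs : List α) (m : α)
    (h : pvFmin K xs = some m) :
    ∃ pre suf, xs = pre ++ m :: suf ∧ ∀ y ∈ pre, K m < K y := by
  induction xs generalizing m with
  | nil => simp [pvFmin] at h
  | cons x xs ih =>
    simp only [pvFmin] at h
    cases hx : pvFmin K xs with
    | none =>
      rw [hx] at h; simp at h; subst h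
      exact ⟨[], xs, rfl, by simp⟩
    | some m0 =>
      rw [hx] at h
      by_cases hlt : K m0 < K x
      · simp [hlt] at h; subst h
        obtain ⟨pre, suf, hdec, hpre⟩ := ih _ hx
        exact ⟨x :: pre, suf, by simp [hdec], by
          intro y hy
          rcases List.mem_cons.1 hy with rfl | hy'
          · exact hlt
          · exact hpre _ hy'⟩
      · simp [hlt] at h; subst h
        exact ⟨[], xs, rfl, by simp⟩

theorem pvFmin_eq_of_decomp {α : Type} (K : α → Int) (pre suf : List α) (m : α)
    (hpre : ∀ y ∈ pre, K m < K y) (hsuf : ∀ y ∈ suf, K m ≤ K y) :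
    pvFmin K (pre ++ m :: suf) = some m := by
  induction pre with
  | nil =>
    simp only [List.nil_append, pvFmin]
    cases hx : pvFmin K suf with
    | none => simp
    | some m1 =>
      have : K m ≤ K m1 := hsuf _ (pvFmin_mem _ _ _ hx)
      simp only []
      rw [if_neg (by omega)]
  | cons x pre ih =>
    have hrec := ih (fun y hy => hpre y (List.mem_cons_of_mem _ hy))
    simp only [List.cons_append, pvFmin, hrec]
    rw [if_pos (hpre x (List.mem_cons_self))]

theorem pvFmin_filter {α : Type} (K : α → Int) (P : α → Bool) (xs : List α) (m : α)
    (h : pvFmin K xs = some m) (hm : P m = true) :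
    pvFmin K (xs.filter P) = some m := by
  obtain ⟨pre, suf, hdec, hpre⟩ := pvFmin_spec K xs m h
  have hle := pvFmin_le K xs m h
  subst hdec
  rw [List.filter_append, List.filter_cons_of_pos hm]
  exact pvFmin_eq_of_decomp K _ _ m
    (fun y hy => hpre _ (List.mem_of_mem_filter hy))
    (fun y hy => hle _ (by
      have := List.mem_of_mem_filter hy
      exact List.mem_append.2 (Or.inr (List.mem_cons_of_mem _ this))))

theorem pvEraseKey_of_decomp {α : Type} (K : α → Int) (pre suf : List α) (m : α)
    (hpre : ∀ y ∈ pre, K y ≠ K m) :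
    pvEraseKey K (K m) (pre ++ m :: suf) = pre ++ suf := by
  induction pre with
  | nil => simp [pvEraseKey]
  | cons x pre ih =>
    simp only [List.cons_append, pvEraseKey]
    rw [if_neg (hpre x List.mem_cons_self), ih (fun y hy => hpre y (List.mem_cons_of_mem _ hy))]

theorem pvEraseKey_snoc_mem {α : Type} (K : α → Int) (k : Int) (xs : List α) (x : α)
    (h : ∃ y ∈ xs, K y = k) :
    pvEraseKey K k (xs ++ [x]) = pvEraseKey K k xs ++ [x] := by
  induction xs with
  | nil => simp at h
  | cons z xs ih =>
    by_cases hz : K z = k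
    · simp [pvEraseKey, hz]
    · obtain ⟨y, hy, hyk⟩ := h
      rcases List.mem_cons.1 hy with rfl | hy'
      · exact absurd hyk hz
      · simp [pvEraseKey, hz, ih ⟨y, hy', hyk⟩]

theorem pvEraseKey_snoc_none {α : Type} (K : α → Int) (k : Int) (xs : List α) (x : α)
    (h : ∀ y ∈ xs, K y ≠ k) (hx : K x = k) :
    pvEraseKey K k (xs ++ [x]) = xs := by
  induction xs with
  | nil => simp [pvEraseKey, hx]
  | cons z xs ih =>
    simp only [List.cons_append, pvEraseKey]
    rw [if_neg (h z List.mem_cons_self), ih (fun y hy => h y (List.mem_cons_of_mem _ hy))]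

theorem pvSorted_snoc {α : Type} (K : α → Int) (xs : List α) (x : α) :
    PySem.List.sorted (xs ++ [x]) K false =
      PySem.List.insertBy (fun a b => decide (K a < K b)) x (PySem.List.sorted xs K false) := by
  rw [PySem.List.sorted_eq_foldl_insertBy, PySem.List.sorted_eq_foldl_insertBy,
    List.foldl_append]
  rfl

theorem pvHeadSort {α : Type} (K : α → Int) (xs : List α) (m : α)
    (h : pvFmin K xs = some m) :
    PySem.List.sorted xs K false =
      m :: PySem.List.sorted (pvEraseKey K (K m) xs) K false := by
  induction xs using List.reverseRecOn generalizing m with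
  | nil => simp [pvFmin] at h
  | append_singleton xs x ih =>
    rw [pvFmin_snoc] at h
    cases hx : pvFmin K xs with
    | none =>
      rw [hx] at h
      simp only [Option.some.injEq] at h
      subst h
      rw [pvFmin_eq_none_iff] at hx; subst hx
      simp [PySem.List.sorted_eq_foldl_insertBy, PySem.List.insertBy, pvEraseKey]
    | some m0 =>
      rw [hx] at h
      simp only [Option.some.injEq] at h
      by_cases hlt : K x < K m0
      · rw [if_pos hlt] at h; subst h
        have herase : pvEraseKey K (K x) (xs ++ [x]) = xs :=
          pvEraseKey_snoc_none K (K x) xs x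
            (fun y hy => by have := pvFmin_le K xs m0 hx y hy; omega) rfl
        rw [herase, pvSorted_snoc, ih m0 hx, PySem.List.insertBy]
        rw [if_pos (by simp [hlt])]
      · rw [if_neg hlt] at h; subst h
        have herase : pvEraseKey K (K m0) (xs ++ [x]) = pvEraseKey K (K m0) xs ++ [x] :=
          pvEraseKey_snoc_mem K (K m0) xs x ⟨m0, pvFmin_mem K xs m0 hx, rfl⟩
        rw [herase, pvSorted_snoc, ih m0 hx, PySem.List.insertBy]
        rw [if_neg (by simp; omega), pvSorted_snoc]

-- row-major cell lists
def pvRowCells (r c0 : Int) : List Int → List (Int × Int × Int)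
  | [] => []
  | v :: vs => (r, c0, v) :: pvRowCells r (c0 + 1) vs

def pvCells (r0 : Int) : List (List Int) → List (Int × Int × Int)
  | [] => []
  | row :: rows => pvRowCells r0 0 row ++ pvCells (r0 + 1) rows

def pvGood4 (c : Int × Int × Int) : Bool := decide ((¬(c.1 = 0 ∧ c.2.1 = 0)) ∧ 4 ≤ pvAbs c.2.2)
def pvGood0 (c : Int × Int × Int) : Bool := decide ((¬(c.1 = 0 ∧ c.2.1 = 0)) ∧ 0 < pvAbs c.2.2)

def pvStep (s : Int × Option Int × Option Int) (c : Int × Int × Int) :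
    Int × Option Int × Option Int :=
  if c.1 = 0 ∧ c.2.1 = 0 then s
  else if pvAbs c.2.2 > s.1 then (pvAbs c.2.2, some c.1, some c.2.1) else s

theorem pvRowCells_mem_facts (r : Int) (row : List Int) (c0 : Int) :
    ∀ y ∈ pvRowCells r c0 row, y.1 = r ∧ c0 ≤ y.2.1 := by
  induction row generalizing c0 with
  | nil => simp [pvRowCells]
  | cons v vs ih =>
    intro y hy
    rcases List.mem_cons.1 hy with rfl | hy'
    · exact ⟨rfl, le_refl _⟩
    · obtain ⟨h1, h2⟩ := ih (c0 + 1) y hy'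
      exact ⟨h1, by omega⟩

theorem pvRowCells_mem (r : Int) (row : List Int) (c0 : Int) (y : Int × Int × Int)
    (hy : y ∈ pvRowCells r c0 row) :
    ∃ (j : Nat) (hj : j < row.length), y = (r, c0 + (j : Int), row[j]) := by
  induction row generalizing c0 with
  | nil => simp [pvRowCells] at hy
  | cons v vs ih =>
    rcases List.mem_cons.1 hy with rfl | hy'
    · exact ⟨0, by simp, by simp⟩
    · obtain ⟨j, hj, hy2⟩ := ih (c0 + 1) hy'
      refine ⟨j + 1, by simpa using hj, ?_⟩
      rw [hy2]
      have hc : c0 + 1 + (j : Int) = c0 + ((j + 1 : Nat) : Int) := by push_cast; ring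
      simp [hc]

theorem pvCells_mem (rows : List (List Int)) (r0 : Int) (y : Int × Int × Int)
    (hy : y ∈ pvCells r0 rows) :
    ∃ (i j : Nat) (hi : i < rows.length) (hj : j < rows[i].length),
      y = (r0 + (i : Int), (j : Int), rows[i][j]) := by
  induction rows generalizing r0 with
  | nil => simp [pvCells] at hy
  | cons row rows ih =>
    rcases List.mem_append.1 hy with hy' | hy'
    · obtain ⟨j, hj, hy2⟩ := pvRowCells_mem r0 row 0 y hy'
      exact ⟨0, j, by simp, by simpa using hj, by simpa using hy2⟩
    · obtain ⟨i, j, hi, hj, hy2⟩ := ih (r0 + 1) hy'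
      refine ⟨i + 1, j, by simpa using hi, by simpa using hj, ?_⟩
      rw [hy2]
      have hc : r0 + 1 + (i : Int) = r0 + ((i + 1 : Nat) : Int) := by push_cast; ring
      simp [hc]

theorem pvCells_row_lb (rows : List (List Int)) (r0 : Int) :
    ∀ y ∈ pvCells r0 rows, r0 ≤ y.1 := by
  induction rows generalizing r0 with
  | nil => simp [pvCells]
  | cons row rows ih =>
    intro y hy
    rcases List.mem_append.1 hy with hy' | hy'
    · exact le_of_eq (pvRowCells_mem_facts r0 row 0 y hy').1.symm
    · have := ih (r0 + 1) y hy'; omega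

theorem pvRowCells_length (r c0 : Int) (row : List Int) :
    (pvRowCells r c0 row).length = row.length := by
  induction row generalizing c0 with
  | nil => rfl
  | cons v vs ih => simp [pvRowCells, ih]

theorem pvCells_length (rows : List (List Int)) (r0 : Int) :
    (pvCells r0 rows).length = (rows.map List.length).sum := by
  induction rows generalizing r0 with
  | nil => rfl
  | cons row rows ih => simp [pvCells, pvRowCells_length, ih]

theorem pvRowCells_set (r : Int) (row : List Int) :
    ∀ (c0 : Int) (j : Nat) (hj : j < row.length),
    ∃ B1 B2, pvRowCells r c0 row = B1 ++ (r, c0 + (j : Int), row[j]) :: B2 ∧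
      pvRowCells r c0 (row.set j 0) = B1 ++ (r, c0 + (j : Int), 0) :: B2 ∧
      (∀ y ∈ B1, y.1 = r ∧ y.2.1 ≠ c0 + (j : Int)) ∧
      (∀ y ∈ B2, y.1 = r ∧ y.2.1 ≠ c0 + (j : Int)) := by
  induction row with
  | nil => intro c0 j hj; simp at hj
  | cons v vs ih =>
    intro c0 j hj
    cases j with
    | zero =>
      refine ⟨[], pvRowCells r (c0 + 1) vs, by simp [pvRowCells], by simp [pvRowCells], by simp, ?_⟩
      intro y hy
      obtain ⟨h1, h2⟩ := pvRowCells_mem_facts r vs (c0 + 1) y hy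
      exact ⟨h1, by omega⟩
    | succ j =>
      obtain ⟨B1, B2, h1, h2, h3, h4⟩ := ih (c0 + 1) j (by simpa using hj)
      have hco : c0 + 1 + (j : Int) = c0 + ((j : Nat) + 1 : Nat) := by push_cast; ring
      refine ⟨(r, c0, v) :: B1, B2, ?_, ?_, ?_, ?_⟩
      · simp only [pvRowCells, h1, hco, List.getElem_cons_succ]; rfl
      · simp only [List.set_cons_succ, pvRowCells, h2, hco]; rfl
      · intro y hy
        rcases List.mem_cons.1 hy with rfl | hy'
        · exact ⟨rfl, by push_cast; omega⟩
        · obtain ⟨a, b⟩ := h3 y hy'; exact ⟨a, by omega⟩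
      · intro y hy
        obtain ⟨a, b⟩ := h4 y hy; exact ⟨a, by omega⟩

theorem pvCells_set (rows : List (List Int)) :
    ∀ (r0 : Int) (i j : Nat) (hi : i < rows.length) (hj : j < rows[i].length),
    ∃ A1 A2, pvCells r0 rows = A1 ++ (r0 + (i : Int), (j : Int), rows[i][j]) :: A2 ∧
      pvCells r0 (rows.set i (rows[i].set j 0)) = A1 ++ (r0 + (i : Int), (j : Int), 0) :: A2 ∧
      (∀ y ∈ A1, ¬(y.1 = r0 + (i : Int) ∧ y.2.1 = (j : Int))) ∧
      (∀ y ∈ A2, ¬(y.1 = r0 + (i : Int) ∧ y.2.1 = (j : Int))) := by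
  induction rows with
  | nil => intro r0 i j hi hj; simp at hi
  | cons row rows ih =>
    intro r0 i j hi hj
    cases i with
    | zero =>
      simp only [List.getElem_cons_zero] at hj ⊢
      obtain ⟨B1, B2, h1, h2, h3, h4⟩ := pvRowCells_set r0 row 0 j hj
      refine ⟨B1, B2 ++ pvCells (r0 + 1) rows, ?_, ?_, ?_, ?_⟩
      · simp only [pvCells, h1]; simp
      · simp only [List.set_cons_zero, pvCells, h2]; simp
      · intro y hy
        obtain ⟨a, b⟩ := h3 y hy
        simp only [zero_add] at *
        intro ⟨hc, hd⟩; exact b (by omega)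
      · intro y hy
        rcases List.mem_append.1 hy with hy' | hy'
        · obtain ⟨a, b⟩ := h4 y hy'
          intro ⟨hc, hd⟩; exact b (by omega)
        · have := pvCells_row_lb rows (r0 + 1) y hy'
          intro ⟨hc, hd⟩; omega
    | succ i =>
      simp only [List.getElem_cons_succ] at hj ⊢
      obtain ⟨A1, A2, h1, h2, h3, h4⟩ := ih (r0 + 1) i j (by simpa using hi) hj
      have hcast : r0 + 1 + (i : Int) = r0 + ((i : Nat) + 1 : Nat) := by push_cast; ring
      refine ⟨pvRowCells r0 0 row ++ A1, A2, ?_, ?_, ?_, ?_⟩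
      · simp only [pvCells, h1, hcast]; simp
      · simp only [List.set_cons_succ, pvCells, h2, hcast]; simp
      · intro y hy
        rcases List.mem_append.1 hy with hy' | hy'
        · obtain ⟨a, b⟩ := pvRowCells_mem_facts r0 row 0 y hy'
          intro ⟨hc, hd⟩; omega
        · have := h3 y hy'
          intro ⟨hc, hd⟩; exact this ⟨by omega, hd⟩
      · intro y hy
        have := h4 y hy
        intro ⟨hc, hd⟩; exact this ⟨by omega, hd⟩


theorem pvRowCells_eq_enumerate (r : Int) (row : List Int) (c0 : Int) :
    pvRowCells r c0 row = (PySem.List.enumerate row c0).map (fun q => (r, q.1, q.2)) := by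
  induction row generalizing c0 with
  | nil => simp [pvRowCells, PySem.List.enumerate_nil]
  | cons v vs ih => simp [pvRowCells, PySem.List.enumerate_cons, ih]

theorem pvScanRow_eq (row : Int) (r : List Int) (s : Int × Option Int × Option Int) :
    pvScanRow row r s = (pvRowCells row 0 r).foldl pvStep s := by
  rw [pvRowCells_eq_enumerate, PySem.List.enumerate_eq_map_pyRange r 0, List.map_map,
    List.foldl_map]
  unfold pvScanRow pvStep
  simp

theorem pvCells_foldl (rows : List (List Int)) :
    ∀ (r0 : Int) (s : Int × Option Int × Option Int),
    (PySem.List.enumerate rows r0).foldl (fun s p => (pvRowCells p.1 0 p.2).foldl pvStep s) s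
      = (pvCells r0 rows).foldl pvStep s := by
  induction rows with
  | nil => intro r0 s; simp [pvCells, PySem.List.enumerate_nil]
  | cons row rows ih =>
    intro r0 s
    simp [pvCells, PySem.List.enumerate_cons, List.foldl_append, ih]

theorem pvScan_eq (tc : List (List Int)) (s : Int × Option Int × Option Int) :
    pvScan tc s = (pvCells 0 tc).foldl pvStep s := by
  rw [← pvCells_foldl]
  unfold pvScan
  rw [PySem.List.enumerate_eq_map_pyRange tc [], List.foldl_map]
  simp only [pvScanRow_eq]
  simp

theorem pvScanChar (cs : List (Int × Int × Int)) :
    ∀ (o1 o2 : Option Int),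
    cs.foldl pvStep (0, o1, o2) =
      match pvFmin pvKey (cs.filter pvGood0) with
      | none => (0, o1, o2)
      | some m => (pvAbs m.2.2, some m.1, some m.2.1) := by
  induction cs using List.reverseRecOn with
  | nil => intro o1 o2; rfl
  | append_singleton cs c ih =>
    intro o1 o2
    rw [List.foldl_append, ih, List.filter_append]
    cases hgb : pvGood0 c with
    | true =>
      have hg' := of_decide_eq_true hgb
      rw [List.filter_singleton]
      simp only [hgb, cond_true]
      rw [pvFmin_snoc]
      cases hm : pvFmin pvKey (cs.filter pvGood0) with
      | none =>
        simp only [List.foldl_cons, List.foldl_nil, pvStep]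
        rw [if_neg hg'.1]
        rw [if_pos (by have := hg'.2; omega)]
      | some m =>
        simp only [List.foldl_cons, List.foldl_nil, pvStep]
        rw [if_neg hg'.1]
        by_cases hlt : pvKey c < pvKey m
        · rw [if_pos (by unfold pvKey at hlt; omega), if_pos hlt]
        · rw [if_neg (by unfold pvKey at hlt; omega), if_neg hlt]
    | false =>
      have hg' := of_decide_eq_false hgb
      rw [List.filter_singleton]
      simp only [hgb, cond_false, List.append_nil]
      have habs : 0 ≤ pvAbs c.2.2 := pvAbs_nonneg _
      cases hm : pvFmin pvKey (cs.filter pvGood0) with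
      | none =>
        simp only [List.foldl_cons, List.foldl_nil, pvStep]
        split_ifs with h1 h2
        · rfl
        · exfalso; exact hg' ⟨h1, by omega⟩
        · rfl
      | some m =>
        have hm0 := pvAbs_nonneg m.2.2
        simp only [List.foldl_cons, List.foldl_nil, pvStep]
        split_ifs with h1 h2
        · rfl
        · exfalso; exact hg' ⟨h1, by omega⟩
        · rfl

theorem pvAltInner (r : Int) (row : List Int) :
    ∀ (c0 : Int) (acc : List (Int × Int × Int)),
    (PySem.List.enumerate row c0).foldl (fun acc2 q =>
        if (¬(r = 0 ∧ q.1 = 0)) ∧ 4 ≤ pvAbs q.2 then acc2 ++ [(r, q.1, q.2)] else acc2) acc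
      = acc ++ (pvRowCells r c0 row).filter pvGood4 := by
  induction row with
  | nil => intro c0 acc; simp [pvRowCells, PySem.List.enumerate_nil]
  | cons v vs ih =>
    intro c0 acc
    rw [PySem.List.enumerate_cons]
    simp only [List.foldl_cons]
    rw [ih]
    by_cases hg : (¬(r = 0 ∧ c0 = 0)) ∧ 4 ≤ pvAbs v
    · rw [if_pos hg]
      simp only [pvRowCells, List.filter_cons]
      rw [if_pos (by simp only [pvGood4, decide_eq_true_eq]; tauto)]
      simp
    · rw [if_neg hg]
      simp only [pvRowCells, List.filter_cons]
      rw [if_neg (by simp only [pvGood4, decide_eq_true_eq]; tauto)]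

theorem pvAltOuter (rows : List (List Int)) :
    ∀ (r0 : Int) (acc : List (Int × Int × Int)),
    (PySem.List.enumerate rows r0).foldl (fun acc p =>
      (PySem.List.enumerate p.2 0).foldl (fun acc2 q =>
        if (¬(p.1 = 0 ∧ q.1 = 0)) ∧ 4 ≤ pvAbs q.2 then acc2 ++ [(p.1, q.1, q.2)] else acc2) acc) acc
      = acc ++ (pvCells r0 rows).filter pvGood4 := by
  induction rows with
  | nil => intro r0 acc; simp [pvCells, PySem.List.enumerate_nil]
  | cons row rows ih =>
    intro r0 acc
    rw [PySem.List.enumerate_cons]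
    simp only [List.foldl_cons]
    rw [pvAltInner, ih]
    simp [pvCells, List.filter_append]

theorem pvAlt_eq (t : List (List Int)) :
    sort_linear_approximation_table_alt t
      = PySem.List.sorted ((pvCells 0 t).filter pvGood4) pvKey false := by
  unfold sort_linear_approximation_table_alt
  rw [pvAltOuter]
  simp

theorem pvFirst_occ_unique {α : Type} (m : α) :
    ∀ (p1 s1 p2 s2 : List α), p1 ++ m :: s1 = p2 ++ m :: s2 → m ∉ p1 → m ∉ p2 →
      p1 = p2 ∧ s1 = s2 := by
  intro p1
  induction p1 with
  | nil =>
    intro s1 p2 s2 h h1 h2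
    cases p2 with
    | nil => simpa using h
    | cons x p2 =>
      simp only [List.nil_append, List.cons_append, List.cons.injEq] at h
      exact absurd (h.1 ▸ List.mem_cons_self) h2
  | cons x p1 ih =>
    intro s1 p2 s2 h h1 h2
    cases p2 with
    | nil =>
      simp only [List.cons_append, List.nil_append, List.cons.injEq] at h
      exact absurd (h.1.symm ▸ List.mem_cons_self) h1
    | cons y p2 =>
      simp only [List.cons_append, List.cons.injEq] at h
      obtain ⟨rfl, h⟩ := h
      obtain ⟨ha, hb⟩ := ih s1 p2 s2 h (fun hm => h1 (List.mem_cons_of_mem _ hm))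
        (fun hm => h2 (List.mem_cons_of_mem _ hm))
      exact ⟨by rw [ha], hb⟩

theorem pvGood4_to_good0 (c : Int × Int × Int) (h : pvGood4 c = true) : pvGood0 c = true := by
  simp only [pvGood4, decide_eq_true_eq] at h
  simp only [pvGood0, decide_eq_true_eq]
  exact ⟨h.1, by have := h.2; omega⟩

theorem pvGood4_char (c : Int × Int × Int) :
    pvGood4 c = (pvGood0 c && decide (4 ≤ pvAbs c.2.2)) := by
  have h0 := pvAbs_nonneg c.2.2
  simp only [pvGood4, pvGood0]
  by_cases h1 : c.1 = 0 ∧ c.2.1 = 0 <;> by_cases h2 : 4 ≤ pvAbs c.2.2 <;>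
    by_cases h3 : 0 < pvAbs c.2.2 <;> · simp [h1, h2, h3]; try omega

def pvInv (t tc : List (List Int)) : Prop :=
  tc.length = t.length ∧
  ∀ (i : Nat) (hi : i < tc.length) (hi' : i < t.length),
    (tc[i]'hi).length = (t[i]'hi').length ∧
    ∀ (j : Nat) (hj : j < (tc[i]'hi).length) (hj' : j < (t[i]'hi').length),
      (tc[i]'hi)[j]'hj = (t[i]'hi')[j]'hj' ∨ (tc[i]'hi)[j]'hj = 0

theorem pvInv_refl (t : List (List Int)) : pvInv t t :=
  ⟨rfl, fun _ _ _ => ⟨rfl, fun _ _ _ => Or.inl rfl⟩⟩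

theorem pvInv_set (t tc : List (List Int)) (i j : Nat) (hi : i < tc.length)
    (_hj : j < (tc[i]'hi).length) (hinv : pvInv t tc) :
    pvInv t (tc.set i ((tc[i]'hi).set j 0)) := by
  obtain ⟨hlen, hcell⟩ := hinv
  refine ⟨by simpa using hlen, ?_⟩
  intro i' hi' hi''
  have hi2 : i' < tc.length := by simpa using hi'
  obtain ⟨hl, hc⟩ := hcell i' hi2 hi''
  by_cases hii : i = i'
  · subst hii
    refine ⟨by simp [hl], ?_⟩
    intro j' hj' hj''
    have hj2 : j' < (tc[i]'hi2).length := by simpa using hj'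
    by_cases hjj : j = j'
    · subst hjj; right; simp
    · have h := hc j' hj2 hj''
      simp only [List.getElem_set_self, List.getElem_set_ne hjj]
      exact h
  · refine ⟨by simp [List.getElem_set_ne hii, hl], ?_⟩
    intro j' hj' hj''
    have h := hc j' (by simpa [List.getElem_set_ne hii] using hj') hj''
    simp only [List.getElem_set_ne hii]
    exact h

theorem pvLoop_eq (t : List (List Int)) :
    ∀ (fuel : Nat) (tc : List (List Int)) (rc : Option Int × Option Int)
      (acc : List (Int × Int × Int)),
      pvInv t tc → ((pvCells 0 tc).filter pvGood4).length < fuel →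
      pvLoop t fuel tc rc acc
        = acc ++ PySem.List.sorted ((pvCells 0 tc).filter pvGood4) pvKey false := by
  intro fuel
  induction fuel with
  | zero => intro tc rc acc _ h; omega
  | succ fuel ih =>
    intro tc rc acc hinv hlen
    have hscan : pvScan tc (0, rc.1, rc.2)
        = match pvFmin pvKey ((pvCells 0 tc).filter pvGood0) with
          | none => (0, rc.1, rc.2)
          | some m => (pvAbs m.2.2, some m.1, some m.2.1) := by
      rw [pvScan_eq]; exact pvScanChar _ rc.1 rc.2
    cases hfm : pvFmin pvKey ((pvCells 0 tc).filter pvGood0) with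
    | none =>
      have hemp : (pvCells 0 tc).filter pvGood4 = [] := by
        rw [pvFmin_eq_none_iff] at hfm
        rw [List.eq_nil_iff_forall_not_mem]
        intro x hx
        have hx0 : x ∈ (pvCells 0 tc).filter pvGood0 := by
          rw [List.mem_filter] at hx ⊢
          exact ⟨hx.1, pvGood4_to_good0 _ hx.2⟩
        rw [hfm] at hx0
        simp at hx0
      rw [hfm] at hscan
      simp only [pvLoop, hscan]
      rw [if_pos (by norm_num), hemp]
      simp [PySem.List.sorted_eq_foldl_insertBy]
    | some m =>
      rw [hfm] at hscan
      have hg0 : pvGood0 m = true := (List.mem_filter.1 (pvFmin_mem _ _ _ hfm)).2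
      have hg0' := of_decide_eq_true hg0
      by_cases habs : pvAbs m.2.2 < 4
      · have hemp : (pvCells 0 tc).filter pvGood4 = [] := by
          rw [List.eq_nil_iff_forall_not_mem]
          intro x hx
          have hx4 : 4 ≤ pvAbs x.2.2 := by
            have := (List.mem_filter.1 hx).2
            exact (of_decide_eq_true this).2
          have hx0 : x ∈ (pvCells 0 tc).filter pvGood0 := by
            rw [List.mem_filter] at hx ⊢
            exact ⟨hx.1, pvGood4_to_good0 _ hx.2⟩
          have := pvFmin_le _ _ _ hfm x hx0
          unfold pvKey at this
          omega
        simp only [pvLoop, hscan]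
        rw [if_pos habs, hemp]
        simp [PySem.List.sorted_eq_foldl_insertBy]
      · -- the selected cell
        have hmem : m ∈ pvCells 0 tc := (List.mem_filter.1 (pvFmin_mem _ _ _ hfm)).1
        obtain ⟨i, j, hi, hj, hm2⟩ := pvCells_mem tc 0 m hmem
        rw [zero_add] at hm2
        have hti : i < t.length := by have := hinv.1; omega
        have hlenrow := (hinv.2 i hi hti).1
        have htj : j < (t[i]'hti).length := by omega
        -- the cell value is unchanged in the copy: it is nonzero
        have hvne : (tc[i]'hi)[j]'hj ≠ 0 := by
          intro h0
          rw [hm2] at habs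
          simp only [h0] at habs
          exact habs (by norm_num [pvAbs])
        have hveq : (t[i]'hti)[j]'htj = (tc[i]'hi)[j]'hj := by
          rcases (hinv.2 i hi hti).2 j hj htj with h | h
          · exact h.symm
          · exact absurd h hvne
        -- good4 holds at m
        have hg4 : pvGood4 m = true := by
          simp only [pvGood4, decide_eq_true_eq]
          exact ⟨hg0'.1, by omega⟩
        -- m is also the first minimum of the ≥ 4 candidates
        have hfilt : (pvCells 0 tc).filter pvGood4
            = ((pvCells 0 tc).filter pvGood0).filter (fun c => decide (4 ≤ pvAbs c.2.2)) := by
          rw [List.filter_filter]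
          exact List.filter_congr (fun c _ => by rw [pvGood4_char c, Bool.and_comm])
        have hfm4 : pvFmin pvKey ((pvCells 0 tc).filter pvGood4) = some m := by
          rw [hfilt]
          exact pvFmin_filter _ _ _ _ hfm (by simp; omega)
        -- the decomposition of the cell list at (i, j)
        obtain ⟨A1, A2, hd1, hd2, hA1, hA2⟩ := pvCells_set tc 0 i j hi hj
        rw [zero_add] at hd1 hd2 hA1 hA2
        have hF1 : (pvCells 0 tc).filter pvGood4
            = A1.filter pvGood4 ++ m :: A2.filter pvGood4 := by
          rw [hd1, List.filter_append, List.filter_cons, ← hm2, hg4]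
          simp
        have hF2 : (pvCells 0 (tc.set i ((tc[i]'hi).set j 0))).filter pvGood4
            = A1.filter pvGood4 ++ A2.filter pvGood4 := by
          rw [hd2, List.filter_append, List.filter_cons]
          have : pvGood4 ((i : Int), (j : Int), (0 : Int)) = false := by
            simp [pvGood4, pvAbs]
          rw [this]
          simp
        -- identify the prefix preceding the first minimum
        obtain ⟨pre, suf, hdec, hpre⟩ := pvFmin_spec _ _ _ hfm4
        have hmnotpre : m ∉ pre := fun hmp => absurd (hpre m hmp) (lt_irrefl _)
        have hmnotF1 : m ∉ A1.filter pvGood4 := by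
          intro hmf
          have := hA1 m (List.mem_of_mem_filter hmf)
          rw [hm2] at this
          exact this ⟨rfl, rfl⟩
        obtain ⟨hpre_eq, hsuf_eq⟩ := pvFirst_occ_unique m (A1.filter pvGood4)
          (A2.filter pvGood4) pre suf (by rw [← hF1, hdec]) hmnotF1 hmnotpre
        have herase : pvEraseKey pvKey (pvKey m) ((pvCells 0 tc).filter pvGood4)
            = A1.filter pvGood4 ++ A2.filter pvGood4 := by
          rw [hF1]
          exact pvEraseKey_of_decomp pvKey _ _ m (fun y hy => by
            have := hpre y (by rw [hpre_eq] at hy; exact hy)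
            omega)
        have hsort : PySem.List.sorted ((pvCells 0 tc).filter pvGood4) pvKey false
            = m :: PySem.List.sorted (A1.filter pvGood4 ++ A2.filter pvGood4) pvKey false := by
          rw [pvHeadSort pvKey _ m hfm4, herase]
        have hlen' : ((pvCells 0 (tc.set i ((tc[i]'hi).set j 0))).filter pvGood4).length
            < fuel := by
          rw [hF2]
          rw [hF1] at hlen
          simp only [List.length_append, List.length_cons] at hlen ⊢
          omega
        have hinv' := pvInv_set t tc i j hi hj hinv
        simp only [pvLoop, hscan]
        rw [if_neg (by simpa using habs)]
        have e1 : PySem.List.pyGetD tc ((i : Nat) : Int) [] = tc[i]'hi := by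
          rw [PySem.List.pyGetD_natCast]; exact List.getD_eq_getElem _ _ hi
        have e2 : PySem.List.pyGetD t ((i : Nat) : Int) [] = t[i]'hti := by
          rw [PySem.List.pyGetD_natCast]; exact List.getD_eq_getElem _ _ hti
        have e3 : PySem.List.pyGetD (t[i]'hti) ((j : Nat) : Int) 0 = (t[i]'hti)[j]'htj := by
          rw [PySem.List.pyGetD_natCast]; exact List.getD_eq_getElem _ _ htj
        rw [hm2]
        simp only [PySem.List.pySetD_natCast, e1, e2, e3]
        rw [ih _ _ _ hinv' hlen', hF2, hsort, hveq, hm2]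
        simp

-- ===== VERDICT (by name: the statement is the Claim_ definition above) =====
theorem sort_linear_approximation_table_spec : Claim_equal_sort_linear_approximation_table := by
  unfold Claim_equal_sort_linear_approximation_table
  intro t _
  unfold Spec_sort_linear_approximation_table sort_linear_approximation_table
  have hcopy : t.map (fun r => PySem.List.slice r none none) = t := by
    simp [PySem.List.slice_none_none]
  rw [hcopy]
  have hbound : ((pvCells 0 t).filter pvGood4).length < (t.map List.length).sum + 1 := by
    have h1 := List.length_filter_le pvGood4 (pvCells 0 t)
    have h2 := pvCells_length t 0
    omega
  rw [pvLoop_eq t _ t (none, none) [] (pvInv_refl t) hbound, pvAlt_eq]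
  simp
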